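-- pv_equiv track=rewrite | github.com/pypi-data/pypi-mirror-256 | packages/vulzap/vulzap-0.1.1.tar.gz/vulzap-0.1.1/vulzap/utils.py | pattern_create
-- ===== SOURCE A (Python) =====
-- def pattern_create(length: int):
--     pattern = ""
--     chars = "ABCDEFGHIJKLMNOPQRSTUVWXYZ"
--     chars_lower = chars.lower()
--     digits = "0123456789"
--
--     while len(pattern) < length:
--         for c in chars:
--             for cl in chars_lower:
--                 for d in digits:
--                     if len(pattern) < length:
--                         pattern += c + cl + d
--                     else:
--                         break
--                 if len(pattern) >= length:
--                     break
--             if len(pattern) >= length: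
--                 break
--
--     return pattern[:length]
-- ===== SOURCE B (Python) =====
-- def pattern_create(length: int):
--     chars = "ABCDEFGHIJKLMNOPQRSTUVWXYZ"
--     base = "".join(c + cl + d for c in chars for cl in chars.lower() for d in "0123456789")
--     return (base * (length // len(base) + 1))[:length]
-- ===== Notes on version B (the rewrite author's own statement) =====
-- stated objective: simpler
-- what changed: Replaces the restarting while loop with break-checked triple-nested appends by building the single full period once via a comprehension join, then tiling and slicing it to the requested length.
import Mathlib
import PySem

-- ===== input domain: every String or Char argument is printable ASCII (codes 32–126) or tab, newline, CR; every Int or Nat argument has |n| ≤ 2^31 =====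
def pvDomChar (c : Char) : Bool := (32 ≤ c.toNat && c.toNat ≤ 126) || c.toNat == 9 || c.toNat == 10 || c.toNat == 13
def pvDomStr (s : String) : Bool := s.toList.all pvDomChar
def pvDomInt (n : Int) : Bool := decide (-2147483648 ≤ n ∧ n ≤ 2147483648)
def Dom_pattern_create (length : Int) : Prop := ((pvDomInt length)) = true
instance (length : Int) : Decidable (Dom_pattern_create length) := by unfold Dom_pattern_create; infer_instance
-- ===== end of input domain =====

-- B builds the single full period once and tiles/slices it, instead of A's
-- restarting while loop over break-checked triple-nested for loops; same return value.

-- ===== PORT A =====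
def pvChars : List Char := "ABCDEFGHIJKLMNOPQRSTUVWXYZ".toList
def pvCharsLower : List Char := PySem.Chars.lower pvChars
def pvDigits : List Char := "0123456789".toList

-- innermost 'for d in digits' loop: append c+cl+d while len(pattern) < length, else break
def pvLoopD (len_ : Int) (pat : List Char) (c cl : Char) (ds : List Char) : List Char :=
  match ds with
  | [] => pat
  | d :: rest =>
    if (pat.length : Int) < len_ then pvLoopD len_ (pat ++ [c, cl, d]) c cl rest else pat

-- 'for cl in chars_lower' loop with its break check
def pvLoopCl (len_ : Int) (pat : List Char) (c : Char) (cls : List Char) : List Char :=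
  match cls with
  | [] => pat
  | cl :: rest =>
    let pat' := pvLoopD len_ pat c cl pvDigits
    if len_ ≤ (pat'.length : Int) then pat' else pvLoopCl len_ pat' c rest

-- 'for c in chars' loop with its break check
def pvLoopC (len_ : Int) (pat : List Char) (cs : List Char) : List Char :=
  match cs with
  | [] => pat
  | c :: rest =>
    let pat' := pvLoopCl len_ pat c pvCharsLower
    if len_ ≤ (pat'.length : Int) then pat' else pvLoopC len_ pat' rest

lemma pvLoopD_mono (len_ : Int) (c cl : Char) :
    ∀ (ds : List Char) (pat : List Char), pat.length ≤ (pvLoopD len_ pat c cl ds).length := by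
  intro ds
  induction ds with
  | nil => intro pat; simp [pvLoopD]
  | cons d rest ih =>
    intro pat
    simp only [pvLoopD]
    split
    · exact le_trans (by simp) (ih (pat ++ [c, cl, d]))
    · exact le_refl _

lemma pvLoopD_grow (len_ : Int) (c cl : Char) (pat : List Char)
    (h : (pat.length : Int) < len_) :
    pat.length < (pvLoopD len_ pat c cl pvDigits).length := by
  have : pvLoopD len_ pat c cl pvDigits
      = pvLoopD len_ (pat ++ [c, cl, '0']) c cl "123456789".toList := by
    simp [pvDigits, pvLoopD, h]
  rw [this]
  exact lt_of_lt_of_le (by simp) (pvLoopD_mono len_ c cl _ _)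

lemma pvLoopCl_mono (len_ : Int) (c : Char) :
    ∀ (cls : List Char) (pat : List Char), pat.length ≤ (pvLoopCl len_ pat c cls).length := by
  intro cls
  induction cls with
  | nil => intro pat; simp [pvLoopCl]
  | cons cl rest ih =>
    intro pat
    simp only [pvLoopCl]
    split
    · exact pvLoopD_mono len_ c cl _ pat
    · exact le_trans (pvLoopD_mono len_ c cl _ pat) (ih _)

lemma pvLoopCl_grow (len_ : Int) (c : Char) (pat : List Char)
    (h : (pat.length : Int) < len_) :
    pat.length < (pvLoopCl len_ pat c pvCharsLower).length := by
  have hcl : pvCharsLower = 'a' :: "bcdefghijklmnopqrstuvwxyz".toList := by decide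
  rw [hcl]
  simp only [pvLoopCl]
  have h1 := pvLoopD_grow len_ c 'a' pat h
  split
  · exact h1
  · exact lt_of_lt_of_le h1 (pvLoopCl_mono len_ c _ _)

lemma pvLoopC_grow (len_ : Int) (pat : List Char)
    (h : (pat.length : Int) < len_) :
    pat.length < (pvLoopC len_ pat pvChars).length := by
  have hc : pvChars = 'A' :: "BCDEFGHIJKLMNOPQRSTUVWXYZ".toList := by decide
  rw [hc]
  simp only [pvLoopC]
  have h1 := pvLoopCl_grow len_ 'A' pat h
  split
  · exact h1
  · refine lt_of_lt_of_le h1 ?_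
    generalize pvLoopCl len_ pat 'A' pvCharsLower = pat'
    generalize "BCDEFGHIJKLMNOPQRSTUVWXYZ".toList = cs
    induction cs generalizing pat' with
    | nil => simp [pvLoopC]
    | cons c rest ih =>
      simp only [pvLoopC]
      split
      · exact pvLoopCl_mono len_ c _ _
      · exact le_trans (pvLoopCl_mono len_ c _ _) (ih _)

-- 'while len(pattern) < length' loop
def pvWhile (len_ : Int) (pat : List Char) : List Char :=
  if h : (pat.length : Int) < len_ then pvWhile len_ (pvLoopC len_ pat pvChars) else pat
termination_by (len_ - pat.length).toNat
decreasing_by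
  have := pvLoopC_grow len_ pat h
  omega

def pattern_create (length : Int) : String :=
  String.ofList (PySem.List.slice (pvWhile length []) none (some length))

-- ===== PORT B =====
def pvBase : List Char :=
  pvChars.flatMap fun c => pvCharsLower.flatMap fun cl => pvDigits.flatMap fun d => [c, cl, d]

def pattern_create_alt (length : Int) : String :=
  let tiled := (List.replicate (PySem.Int.floordiv length (PySem.List.len pvBase) + 1).toNat pvBase).flatten
  String.ofList (PySem.List.slice tiled none (some length))

-- ===== PRECONDITION & SPEC =====
def Spec_pattern_create (length : Int) (out : String) : Prop := out = pattern_create_alt length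
instance (length : Int) (out : String) : Decidable (Spec_pattern_create length out) := by unfold Spec_pattern_create; infer_instance

-- ===== CLAIM (what is proved, stated in full; the proofs are below) =====
def Claim_equal_pattern_create : Prop := ∀ (length : Int), Dom_pattern_create length → Spec_pattern_create length (pattern_create length)

-- ===== LEMMAS AND PROOFS =====

-- abstraction of all three break-checked loops: append triples while len(pattern) < length
def pvAdd (len_ : Int) (pat : List Char) (ts : List (List Char)) : List Char :=
  match ts with
  | [] => pat
  | t :: rest => if (pat.length : Int) < len_ then pvAdd len_ (pat ++ t) rest else pat

def pvTriples : List (List Char) :=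
  pvChars.flatMap fun c => pvCharsLower.flatMap fun cl => pvDigits.map fun d => [c, cl, d]

def pvRep (k : Nat) : List Char := (List.replicate k pvBase).flatten

lemma pvAdd_of_ge (len_ : Int) (pat : List Char) (ts : List (List Char))
    (h : ¬ (pat.length : Int) < len_) : pvAdd len_ pat ts = pat := by
  cases ts <;> simp [pvAdd, h]

lemma pvAdd_append (len_ : Int) (ts₁ ts₂ : List (List Char)) :
    ∀ pat, pvAdd len_ pat (ts₁ ++ ts₂) = pvAdd len_ (pvAdd len_ pat ts₁) ts₂ := by
  induction ts₁ with
  | nil => intro pat; simp [pvAdd]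
  | cons t rest ih =>
    intro pat
    simp only [List.cons_append, pvAdd]
    split
    · exact ih _
    · rw [pvAdd_of_ge _ _ _ (by assumption)]

lemma pvLoopD_eq (len_ : Int) (c cl : Char) :
    ∀ (ds : List Char) (pat : List Char),
      pvLoopD len_ pat c cl ds = pvAdd len_ pat (ds.map fun d => [c, cl, d]) := by
  intro ds
  induction ds with
  | nil => intro pat; simp [pvLoopD, pvAdd]
  | cons d rest ih =>
    intro pat
    simp only [pvLoopD, List.map_cons, pvAdd]
    split
    · exact ih _
    · rfl

lemma pvLoopCl_eq (len_ : Int) (c : Char) :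
    ∀ (cls : List Char) (pat : List Char),
      pvLoopCl len_ pat c cls
        = pvAdd len_ pat (cls.flatMap fun cl => pvDigits.map fun d => [c, cl, d]) := by
  intro cls
  induction cls with
  | nil => intro pat; simp [pvLoopCl, pvAdd]
  | cons cl rest ih =>
    intro pat
    simp only [pvLoopCl, List.flatMap_cons, pvAdd_append, pvLoopD_eq]
    split
    · exact (pvAdd_of_ge _ _ _ (by omega)).symm
    · exact ih _

lemma pvLoopC_eq (len_ : Int) :
    ∀ (cs : List Char) (pat : List Char),
      pvLoopC len_ pat cs
        = pvAdd len_ pat (cs.flatMap fun c => pvCharsLower.flatMap fun cl => pvDigits.map fun d => [c, cl, d]) := by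
  intro cs
  induction cs with
  | nil => intro pat; simp [pvLoopC, pvAdd]
  | cons c rest ih =>
    intro pat
    simp only [pvLoopC, List.flatMap_cons, pvAdd_append, pvLoopCl_eq]
    split
    · exact (pvAdd_of_ge _ _ _ (by omega)).symm
    · exact ih _

lemma pvAdd_spec (len_ : Int) :
    ∀ (ts : List (List Char)) (pat : List Char),
      ∃ k ≤ ts.length, pvAdd len_ pat ts = pat ++ (ts.take k).flatten ∧
        (k = ts.length ∨ len_ ≤ ((pat ++ (ts.take k).flatten).length : Int)) := by
  intro ts
  induction ts with
  | nil => intro pat; exact ⟨0, by simp, by simp [pvAdd], Or.inl rfl⟩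
  | cons t rest ih =>
    intro pat
    simp only [pvAdd]
    split
    · obtain ⟨k, hk, heq, hor⟩ := ih (pat ++ t)
      refine ⟨k + 1, by simpa using hk, by simpa using heq, ?_⟩
      rcases hor with h | h
      · exact Or.inl (by simp [h])
      · exact Or.inr (by simpa using h)
    · exact ⟨0, by simp, by simp, Or.inr (by simp; omega)⟩

lemma pvFlattenFlatMap {α : Type} (xs : List α) (f : α → List (List Char)) :
    (xs.flatMap f).flatten = xs.flatMap fun x => (f x).flatten := by
  induction xs with
  | nil => simp
  | cons a l ih => simp [ih]

lemma pvBase_eq_flatten : pvBase = pvTriples.flatten := by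
  rw [pvTriples, pvFlattenFlatMap]
  refine List.flatMap_congr fun c _ => ?_
  rw [pvFlattenFlatMap]
  refine List.flatMap_congr fun cl _ => ?_
  rw [← List.flatMap_def]

lemma pvRep_succ (k : Nat) : pvRep (k + 1) = pvRep k ++ pvBase := by
  simp [pvRep, List.replicate_succ']

lemma pvRep_prefix {a b : Nat} (h : a ≤ b) : pvRep a <+: pvRep b := by
  refine ⟨(List.replicate (b - a) pvBase).flatten, ?_⟩
  rw [pvRep, pvRep, ← List.flatten_append, ← List.replicate_add]
  congr 2
  omega

lemma pvWhile_of_ge (len_ : Int) (pat : List Char) (h : ¬ (pat.length : Int) < len_) :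
    pvWhile len_ pat = pat := by
  rw [pvWhile]
  simp [h]

lemma pvWhile_inv (len_ : Int) : ∀ (pat : List Char), (∃ k, pat = pvRep k) →
    (∃ K, pvWhile len_ pat <+: pvRep K) ∧
      (len_ ≤ (pat.length : Int) ∨ len_ ≤ ((pvWhile len_ pat).length : Int)) := by
  intro pat
  induction pat using pvWhile.induct (len_ := len_) with
  | case2 pat hlt =>
    intro hrep
    rw [pvWhile_of_ge len_ pat hlt]
    obtain ⟨k, rfl⟩ := hrep
    exact ⟨⟨k, List.prefix_refl _⟩, Or.inl (by omega)⟩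
  | case1 pat hlt ih =>
    rintro ⟨k, rfl⟩
    rw [pvWhile]
    simp only [hlt, dif_pos]
    set pat' := pvLoopC len_ (pvRep k) pvChars with hpat'
    obtain ⟨k', hk', heq, hor⟩ := pvAdd_spec len_ pvTriples (pvRep k)
    have hpat'eq : pat' = pvRep k ++ (pvTriples.take k').flatten := by
      rw [hpat', pvLoopC_eq]
      exact heq
    have hpfx : pat' <+: pvRep (k + 1) := by
      rw [hpat'eq, pvRep_succ, pvBase_eq_flatten]
      refine ⟨(pvTriples.drop k').flatten, ?_⟩
      rw [List.append_assoc, ← List.flatten_append, List.take_append_drop]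
    by_cases hge : len_ ≤ (pat'.length : Int)
    · rw [pvWhile_of_ge len_ pat' (by omega)]
      exact ⟨⟨k + 1, hpfx⟩, Or.inr hge⟩
    · have hfull : k' = pvTriples.length := by
        rcases hor with h | h
        · exact h
        · exfalso; rw [← hpat'eq] at h; omega
      have hrep' : pat' = pvRep (k + 1) := by
        rw [hpat'eq, hfull, List.take_length, ← pvBase_eq_flatten, pvRep_succ]
      obtain ⟨⟨K, hK⟩, hlen⟩ := ih ⟨k + 1, hrep'⟩
      refine ⟨⟨K, hK⟩, Or.inr ?_⟩
      rcases hlen with h | h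
      · rw [pvWhile_of_ge len_ pat' (by omega)]; omega
      · exact h

lemma pvBase_pos : 0 < pvBase.length := by
  have hc : pvChars = 'A' :: "BCDEFGHIJKLMNOPQRSTUVWXYZ".toList := by decide
  have hcl : pvCharsLower = 'a' :: "bcdefghijklmnopqrstuvwxyz".toList := by decide
  have hd : pvDigits = '0' :: "123456789".toList := by decide
  rw [pvBase, hc, hcl, hd]
  simp only [List.flatMap_cons, List.length_append, List.length_cons]
  omega

lemma pvRep_length (k : Nat) : (pvRep k).length = k * pvBase.length := by
  induction k with
  | zero => simp [pvRep]
  | succ n ih => rw [pvRep_succ]; simp [ih]; ring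

lemma take_of_prefix_rep {l : List Char} {K : Nat} (h : l <+: pvRep K) (n : Nat)
    (hn : n ≤ l.length) : l.take n = (pvRep K).take n := by
  obtain ⟨t, ht⟩ := h
  rw [← ht, List.take_append_of_le_length hn]

lemma take_rep_eq {a b : Nat} (n : Nat) (ha : n ≤ (pvRep a).length) (hb : n ≤ (pvRep b).length) :
    (pvRep a).take n = (pvRep b).take n := by
  rcases le_total a b with h | h
  · exact take_of_prefix_rep (pvRep_prefix h) n ha
  · exact (take_of_prefix_rep (pvRep_prefix h) n hb).symm

-- ===== VERDICT (by name: the statement is the Claim_ definition above) =====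
theorem pattern_create_spec : Claim_equal_pattern_create := by
  intro length _
  unfold Spec_pattern_create pattern_create pattern_create_alt
  simp only [PySem.List.len_eq]
  have hB : 0 < pvBase.length := pvBase_pos
  have hBi : (0 : Int) < (pvBase.length : Int) := by exact_mod_cast hB
  have hfd : PySem.Int.floordiv length (pvBase.length : Int) = length / (pvBase.length : Int) :=
    PySem.Int.floordiv_eq_ediv_of_pos hBi
  rw [hfd]
  by_cases hpos : 0 < length
  · have h0 : (0 : Int) ≤ length := le_of_lt hpos
    rw [PySem.List.slice_to _ h0, PySem.List.slice_to _ h0]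
    obtain ⟨⟨K, hK⟩, hlen⟩ := pvWhile_inv length [] ⟨0, by simp [pvRep]⟩
    have hlen' : length ≤ ((pvWhile length []).length : Int) := by
      rcases hlen with h | h
      · simp at h; omega
      · exact h
    set q := length / (pvBase.length : Int) with hq
    have hq0 : 0 ≤ q := Int.ediv_nonneg h0 (le_of_lt hBi)
    have hdm : (pvBase.length : Int) * q + length % (pvBase.length : Int) = length :=
      Int.ediv_add_emod length (pvBase.length : Int)
    have hmod : length % (pvBase.length : Int) < (pvBase.length : Int) :=
      Int.emod_lt_of_pos length hBi
    have hqb : length < (q + 1) * (pvBase.length : Int) := by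
      have hring : (q + 1) * (pvBase.length : Int) = (pvBase.length : Int) * q + pvBase.length := by
        ring
      linarith
    have htcast : ((q + 1).toNat : Int) = q + 1 := Int.toNat_of_nonneg (by omega)
    have htlen : length.toNat ≤ (pvRep (q + 1).toNat).length := by
      rw [pvRep_length]
      have h1 : (length.toNat : Int) ≤ (((q + 1).toNat * pvBase.length : Nat) : Int) := by
        push_cast
        rw [htcast]
        omega
      exact_mod_cast h1
    have hwlen : length.toNat ≤ (pvWhile length []).length := by omega
    have hKlen : length.toNat ≤ (pvRep K).length := le_trans hwlen hK.length_le
    have hrepB : (List.replicate (q + 1).toNat pvBase).flatten = pvRep (q + 1).toNat := rfl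
    rw [hrepB]
    congr 1
    rw [take_of_prefix_rep hK length.toNat hwlen]
    exact take_rep_eq length.toNat hKlen htlen
  · -- length ≤ 0: A's while body never runs; B tiles at most once and slices to length ≤ 0
    have hwhile : pvWhile length [] = [] := pvWhile_of_ge length [] (by simp; omega)
    rw [hwhile]
    rcases lt_or_eq_of_le (not_lt.mp hpos) with hneg | hzero
    · have hqneg : length / (pvBase.length : Int) < 0 := by
        by_contra hcon
        have hcon : 0 ≤ length / (pvBase.length : Int) := not_lt.mp hcon
        have h1 : (pvBase.length : Int) * (length / (pvBase.length : Int))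
            + length % (pvBase.length : Int) = length :=
          Int.ediv_add_emod length (pvBase.length : Int)
        have h2 : 0 ≤ length % (pvBase.length : Int) := Int.emod_nonneg length (by omega)
        have h3 : 0 ≤ (pvBase.length : Int) * (length / (pvBase.length : Int)) :=
          mul_nonneg (le_of_lt hBi) hcon
        linarith
      have ht0 : (length / (pvBase.length : Int) + 1).toNat = 0 := by omega
      rw [ht0]
      rfl
    · subst hzero
      rw [PySem.List.slice_to _ (by omega), PySem.List.slice_to _ (by omega)]
      simp
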